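-- pv_equiv track=rewrite | github.com/MarkAnthonyKoop/talk | special_agents/file_agent.py | _parse_operations
-- ===== SOURCE A (Python) =====
-- from typing import Dict, List, Optional, Tuple, Union
--
-- def _parse_operations(operations_text: str) -> List[Dict]:
--     """Parse the structured operations text."""
--     operations = []
--     current_operation = None
--     current_content = ""
--
--     for line in operations_text.split('\n'):
--         line = line.strip()
--
--         if line.startswith('CREATE_FILE:') or line.startswith('MODIFY_FILE:'):
--             # Save previous operation
--             if current_operation:
--                 operations.append({
--                     'type': current_operation['type'],
--                     'filename': current_operation['filename'],
--                     'content': current_content.strip()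
--                 })
--
--             # Start new operation
--             parts = line.split(':', 1)
--             current_operation = {
--                 'type': parts[0].strip(),
--                 'filename': parts[1].strip()
--             }
--             current_content = ""
--         else:
--             current_content += line + "\n"
--
--     # Save final operation
--     if current_operation:
--         operations.append({
--             'type': current_operation['type'],
--             'filename': current_operation['filename'],
--             'content': current_content.strip()
--         })
--
--     return operations
-- ===== SOURCE B (Python) =====
-- def _parse_operations(operations_text):
--     """Parse the structured operations text (reverse single pass, output built back-to-front)."""
--     operations = []
--     body = []  # stripped body lines of the operation currently being collected, in reverse order
--     for line in reversed(operations_text.split('\n')):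
--         line = line.strip()
--         if line.startswith('CREATE_FILE:') or line.startswith('MODIFY_FILE:'):
--             parts = line.split(':', 1)
--             operations.append({
--                 'type': parts[0].strip(),
--                 'filename': parts[1].strip(),
--                 'content': '\n'.join(reversed(body)).strip(),
--             })
--             body = []
--         else:
--             body.append(line)
--     operations.reverse()
--     return operations
-- ===== Notes on version B (the rewrite author's own statement) =====
-- stated objective: alternative
-- what changed: B replaces A's forward pass, which threads an optional pending header and a growing content string through the loop, with a single reverse traversal that builds the output back-to-front, collecting body lines in a list and joining them when their header is reached.
import Mathlib
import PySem

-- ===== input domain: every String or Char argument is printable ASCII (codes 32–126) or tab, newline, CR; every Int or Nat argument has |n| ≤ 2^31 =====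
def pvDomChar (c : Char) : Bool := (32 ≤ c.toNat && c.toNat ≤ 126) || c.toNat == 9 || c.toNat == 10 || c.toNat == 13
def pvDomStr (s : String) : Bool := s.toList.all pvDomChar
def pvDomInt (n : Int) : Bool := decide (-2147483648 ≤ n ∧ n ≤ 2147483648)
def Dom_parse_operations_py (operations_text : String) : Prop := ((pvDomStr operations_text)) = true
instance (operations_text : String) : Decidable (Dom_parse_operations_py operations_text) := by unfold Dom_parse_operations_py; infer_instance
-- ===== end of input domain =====

-- B builds the same operation list by one reverse traversal (output back-to-front), instead of A's
-- forward pass with an optional current-operation plus string accumulator; alternative decomposition,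
-- same asymptotic cost, return values proved equal on all inputs.

-- ===== PORT A =====
-- state: (operations, current_operation as Option (type, filename), current_content)
def pvStepA (st : List (List (String × String)) × Option (String × String) × String)
    (line0 : String) : List (List (String × String)) × Option (String × String) × String :=
  let line := PySem.Str.strip line0
  if PySem.Str.startswith line "CREATE_FILE:" || PySem.Str.startswith line "MODIFY_FILE:" then
    let ops := match st.2.1 with
      | some op => st.1 ++ [[("type", op.1), ("filename", op.2), ("content", PySem.Str.strip st.2.2)]]
      | none => st.1
    -- parts = line.split(':', 1); parts[1] cannot raise: line starts with a prefix containing ':'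
    let parts := (PySem.Str.splitMax? line ":" 1).getD []
    (ops, some (PySem.Str.strip ((PySem.List.pyGet? parts 0).getD ""),
                PySem.Str.strip ((PySem.List.pyGet? parts 1).getD "")), "")
  else
    (st.1, st.2.1, st.2.2 ++ line ++ "\n")

def parse_operations_py (operations_text : String) : List (List (String × String)) :=
  let fin := ((PySem.Str.split? operations_text "\n").getD []).foldl pvStepA ([], none, "")
  match fin.2.1 with
  | some op => fin.1 ++ [[("type", op.1), ("filename", op.2), ("content", PySem.Str.strip fin.2.2)]]
  | none => fin.1

-- ===== PORT B =====
-- state: (operations in reverse encounter order over the reversed lines, body lines in reverse order)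
def pvStepB (st : List (List (String × String)) × List String)
    (line0 : String) : List (List (String × String)) × List String :=
  let line := PySem.Str.strip line0
  if PySem.Str.startswith line "CREATE_FILE:" || PySem.Str.startswith line "MODIFY_FILE:" then
    let parts := (PySem.Str.splitMax? line ":" 1).getD []
    (st.1 ++ [[("type", PySem.Str.strip ((PySem.List.pyGet? parts 0).getD "")),
               ("filename", PySem.Str.strip ((PySem.List.pyGet? parts 1).getD "")),
               ("content", PySem.Str.strip (PySem.Str.join "\n" st.2.reverse))]], [])
  else
    (st.1, st.2 ++ [line])

def parse_operations_py_alt (operations_text : String) : List (List (String × String)) :=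
  let fin := ((PySem.Str.split? operations_text "\n").getD []).reverse.foldl pvStepB ([], [])
  fin.1.reverse

-- ===== PRECONDITION & SPEC =====
def Spec_parse_operations_py (operations_text : String) (out : List (List (String × String))) : Prop := out = parse_operations_py_alt operations_text
instance (operations_text : String) (out : List (List (String × String))) : Decidable (Spec_parse_operations_py operations_text out) := by unfold Spec_parse_operations_py; infer_instance

-- ===== CLAIM (what is proved, stated in full; the proofs are below) =====
def Claim_equal_parse_operations_py : Prop := ∀ (operations_text : String), Dom_parse_operations_py operations_text → Spec_parse_operations_py operations_text (parse_operations_py operations_text)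

-- ===== LEMMAS AND PROOFS =====

-- stripped-line header test / header parse / record: shared vocabulary of the proofs
def pvHdr (l : String) : Bool :=
  PySem.Str.startswith (PySem.Str.strip l) "CREATE_FILE:" ||
  PySem.Str.startswith (PySem.Str.strip l) "MODIFY_FILE:"

def pvMk (t f c : String) : List (String × String) := [("type", t), ("filename", f), ("content", c)]

def pvParse (l : String) : String × String :=
  let parts := (PySem.Str.splitMax? (PySem.Str.strip l) ":" 1).getD []
  (PySem.Str.strip ((PySem.List.pyGet? parts 0).getD ""),
   PySem.Str.strip ((PySem.List.pyGet? parts 1).getD ""))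

-- canonical right fold: (operation groups from the first header on, stripped body lines before it)
def pvFB : List String → List (List (String × String)) × List String
  | [] => ([], [])
  | l :: ls =>
    let r := pvFB ls
    if pvHdr l then
      (pvMk (pvParse l).1 (pvParse l).2 (PySem.Str.strip (PySem.Str.join "\n" r.2)) :: r.1, [])
    else
      (r.1, PySem.Str.strip l :: r.2)

-- A's content accumulator as a function of the body lines still to come
def pvCat : List String → String
  | [] => ""
  | l :: ls => l ++ "\n" ++ pvCat ls

def pvFinish (st : List (List (String × String)) × Option (String × String) × String) :
    List (List (String × String)) :=
  match st.2.1 with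
  | some op => st.1 ++ [[("type", op.1), ("filename", op.2), ("content", PySem.Str.strip st.2.2)]]
  | none => st.1

theorem pvRstrip_append_nl (xs : List Char) :
    PySem.Chars.rstrip (xs ++ ['\n']) = PySem.Chars.rstrip xs := by
  have h : PySem.Chars.isspace '\n' = true := by decide
  simp [PySem.Chars.rstrip, h]

theorem pvStrip_append_nl (s : String) :
    PySem.Str.strip (s ++ "\n") = PySem.Str.strip s := by
  have hnl : ("\n" : String).toList = ['\n'] := by decide
  unfold PySem.Str.strip
  congr 1
  rw [String.toList_append, hnl]
  unfold PySem.Chars.strip PySem.Chars.lstrip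
  rw [List.dropWhile_append]
  split
  · next h => rw [List.isEmpty_iff] at h; rw [h]; decide
  · exact pvRstrip_append_nl _

theorem pvJoin_cons_cons (b x : String) (xs : List String) :
    PySem.Str.join "\n" (b :: x :: xs) = b ++ "\n" ++ PySem.Str.join "\n" (x :: xs) := by
  unfold PySem.Str.join
  simp only [List.map_cons]
  rw [PySem.Chars.join_cons_cons, String.ofList_append, String.ofList_append, String.ofList_toList]
  rfl

theorem pvCat_nonempty (b : String) (bs : List String) :
    pvCat (b :: bs) = PySem.Str.join "\n" (b :: bs) ++ "\n" := by
  induction bs generalizing b with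
  | nil =>
      show b ++ "\n" ++ "" = _
      rw [String.append_empty]
      unfold PySem.Str.join
      simp [PySem.Chars.join, List.intercalate]
  | cons x xs ih =>
      show b ++ "\n" ++ pvCat (x :: xs) = _
      rw [ih, pvJoin_cons_cons]
      simp [String.append_assoc]

theorem pvStrip_cat_join (bs : List String) :
    PySem.Str.strip (pvCat bs) = PySem.Str.strip (PySem.Str.join "\n" bs) := by
  cases bs with
  | nil => rfl
  | cons b bs => rw [pvCat_nonempty, pvStrip_append_nl]

theorem pvStepB_eq (O : List (List (String × String))) (B : List String) (l : String) :
    pvStepB (O, B) l =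
      if pvHdr l then
        (O ++ [pvMk (pvParse l).1 (pvParse l).2
                 (PySem.Str.strip (PySem.Str.join "\n" B.reverse))], [])
      else (O, B ++ [PySem.Str.strip l]) := by
  simp only [pvStepB, pvHdr, pvParse, pvMk]

theorem pvStepA_eq (O : List (List (String × String))) (cur : Option (String × String))
    (c : String) (l : String) :
    pvStepA (O, cur, c) l =
      if pvHdr l then
        ((match cur with
          | some op => O ++ [pvMk op.1 op.2 (PySem.Str.strip c)]
          | none => O), some (pvParse l), "")
      else (O, cur, c ++ PySem.Str.strip l ++ "\n") := by
  simp only [pvStepA, pvHdr, pvParse, pvMk]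

theorem pvB_rev (ls : List String) :
    ls.reverse.foldl pvStepB ([], []) = ((pvFB ls).1.reverse, (pvFB ls).2.reverse) := by
  induction ls with
  | nil => rfl
  | cons l ls ih =>
      rw [List.reverse_cons, List.foldl_append, ih, List.foldl_cons, List.foldl_nil, pvStepB_eq]
      cases h : pvHdr l with
      | true => simp [pvFB, h, List.reverse_reverse]
      | false => simp [pvFB, h]

theorem pvA_inv (ls : List String) : ∀ (O : List (List (String × String))) (c : String),
    (pvFinish (ls.foldl pvStepA (O, none, c)) = O ++ (pvFB ls).1) ∧
    (∀ hf : String × String,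
      pvFinish (ls.foldl pvStepA (O, some hf, c)) =
        O ++ pvMk hf.1 hf.2 (PySem.Str.strip (c ++ pvCat (pvFB ls).2)) :: (pvFB ls).1) := by
  induction ls with
  | nil =>
      intro O c
      constructor
      · simp [pvFinish, pvFB]
      · intro hf
        simp [pvFinish, pvFB, pvMk, pvCat, String.append_empty]
  | cons l ls ih =>
      intro O c
      constructor
      · rw [List.foldl_cons, pvStepA_eq]
        cases h : pvHdr l with
        | true =>
            have := ((ih O "").2 (pvParse l))
            simp only [reduceIte]
            rw [this]
            have he : ("" : String) ++ pvCat (pvFB ls).2 = pvCat (pvFB ls).2 := by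
              simp
            rw [he, pvStrip_cat_join]
            simp [pvFB, h]
        | false =>
            simp only [Bool.false_eq_true, reduceIte]
            rw [(ih O _).1]
            simp [pvFB, h]
      · intro hf
        rw [List.foldl_cons, pvStepA_eq]
        cases h : pvHdr l with
        | true =>
            simp only [reduceIte]
            rw [((ih _ "").2 (pvParse l))]
            have he : ("" : String) ++ pvCat (pvFB ls).2 = pvCat (pvFB ls).2 := by
              simp
            rw [he, pvStrip_cat_join]
            simp [pvFB, h, pvMk, pvCat, String.append_empty]
        | false =>
            simp only [Bool.false_eq_true, reduceIte]
            rw [((ih O _).2 hf)]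
            simp [pvFB, h, pvCat, String.append_assoc]

-- ===== VERDICT (by name: the statement is the Claim_ definition above) =====
theorem parse_operations_py_spec : Claim_equal_parse_operations_py := by
  intro text _
  show parse_operations_py text = parse_operations_py_alt text
  unfold parse_operations_py parse_operations_py_alt
  rw [pvB_rev, List.reverse_reverse]
  exact ((pvA_inv _ [] "").1).trans (by simp)
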